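-- pv_equiv track=rewrite | github.com/datawhalechina/huawei-od-python | codes/others100/167_matrix-sparse-scan.py | solve_method1
-- ===== SOURCE A (Python) =====
-- def solve_method1(row, col, matrix):
--     count_row = 0
--     for i in range(row):
--         cnt = matrix[i].count(0)
--         if cnt>=col//2:
--             count_row+=1
--     count_col = 0
--     for i in range(col):
--         tmp = []
--         for j in range(row):
--             tmp.append(matrix[j][i])
--         cnt = tmp.count(0)
--         if cnt>=row//2:
--             count_col+=1
--     return count_row, count_col
-- ===== SOURCE B (Python) =====
-- def solve_method1(row, col, matrix):
--     # One row-major pass: accumulate per-column zero counts in a table,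
--     # deciding each row's test on the fly; then scan the table once.
--     count_row = 0
--     col_zeros = [0] * col
--     for i in range(row):
--         r = matrix[i]
--         if r.count(0) >= col // 2:
--             count_row += 1
--         col_zeros = [z + (1 if v == 0 else 0) for z, v in zip(col_zeros, r)]
--     count_col = 0
--     for z in col_zeros:
--         if z >= row // 2:
--             count_col += 1
--     return count_row, count_col
-- ===== Notes on version B (the rewrite author's own statement) =====
-- stated objective: simpler
-- what changed: Replaces the column-major double loop that rebuilds each column as a temporary list with a single row-major pass maintaining a per-column zero-count table, followed by one scan of that table.
import Mathlib
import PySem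

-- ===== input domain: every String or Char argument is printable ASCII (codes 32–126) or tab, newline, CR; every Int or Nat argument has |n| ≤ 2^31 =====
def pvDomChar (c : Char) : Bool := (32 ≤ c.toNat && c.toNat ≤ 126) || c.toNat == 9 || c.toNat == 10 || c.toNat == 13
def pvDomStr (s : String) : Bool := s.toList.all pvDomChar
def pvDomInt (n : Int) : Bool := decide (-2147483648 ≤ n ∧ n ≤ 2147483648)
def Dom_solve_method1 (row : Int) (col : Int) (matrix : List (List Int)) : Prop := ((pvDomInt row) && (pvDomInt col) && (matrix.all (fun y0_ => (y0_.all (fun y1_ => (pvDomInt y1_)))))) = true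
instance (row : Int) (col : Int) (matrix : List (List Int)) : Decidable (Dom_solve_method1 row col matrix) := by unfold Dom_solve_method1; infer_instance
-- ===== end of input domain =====

-- B replaces A's column-major rescan (rebuilding every column as a temporary list) by a single
-- row-major pass maintaining a per-column zero-count table, then one scan of the table.


-- ===== PORT A =====
-- `for i in range(row): cnt = matrix[i].count(0); if cnt >= col//2: count_row += 1`
def pyALoopRow (matrix : List (List Int)) (col : Int) : Nat → Int → Int → Int
  | 0, _, acc => acc
  | n + 1, i, acc => pyALoopRow matrix col n (i + 1)
      (if (PySem.List.count (PySem.List.pyGetD matrix i []) 0 : Int) ≥ PySem.Int.floordiv col 2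
       then acc + 1 else acc)
-- `tmp = []; for j in range(row): tmp.append(matrix[j][i])`
def pyALoopTmp (matrix : List (List Int)) (i : Int) : Nat → Int → List Int → List Int
  | 0, _, t => t
  | n + 1, j, t => pyALoopTmp matrix i n (j + 1)
      (t ++ [PySem.List.pyGetD (PySem.List.pyGetD matrix j []) i 0])
-- `for i in range(col): …tmp…; cnt = tmp.count(0); if cnt >= row//2: count_col += 1`
def pyALoopCol (matrix : List (List Int)) (row : Int) : Nat → Int → Int → Int
  | 0, _, acc => acc
  | n + 1, i, acc => pyALoopCol matrix row n (i + 1)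
      (if (PySem.List.count (pyALoopTmp matrix i row.toNat 0 []) 0 : Int) ≥ PySem.Int.floordiv row 2
       then acc + 1 else acc)
def solve_method1 (row : Int) (col : Int) (matrix : List (List Int)) : Int × Int :=
  let count_row : Int := pyALoopRow matrix col row.toNat 0 0
  let count_col : Int := pyALoopCol matrix row col.toNat 0 0
  (count_row, count_col)

-- ===== PORT B =====
-- `for i in range(row): r = matrix[i]; if r.count(0) >= col//2: count_row += 1;
--  col_zeros = [z + (1 if v == 0 else 0) for z, v in zip(col_zeros, r)]`
def pyBLoopRow (matrix : List (List Int)) (col : Int) : Nat → Int → Int × List Int → Int × List Int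
  | 0, _, st => st
  | n + 1, i, st =>
      let r := PySem.List.pyGetD matrix i []
      pyBLoopRow matrix col n (i + 1)
        ((if (PySem.List.count r 0 : Int) ≥ PySem.Int.floordiv col 2 then st.1 + 1 else st.1),
         (st.2.zip r).map (fun p => p.1 + if p.2 = 0 then 1 else 0))
-- `for z in col_zeros: if z >= row//2: count_col += 1`
def pyBScan (row : Int) : List Int → Int → Int
  | [], acc => acc
  | z :: zs, acc => pyBScan row zs (if z ≥ PySem.Int.floordiv row 2 then acc + 1 else acc)
def solve_method1_alt (row : Int) (col : Int) (matrix : List (List Int)) : Int × Int :=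
  let st := pyBLoopRow matrix col row.toNat 0 (0, List.replicate col.toNat 0)
  let count_col : Int := pyBScan row st.2 0
  (st.1, count_col)

-- ===== PRECONDITION & SPEC =====
-- Pre_ excludes exactly the inputs where A raises IndexError: a row index beyond the matrix,
-- or a column index beyond one of the first `row` rows.
def Pre_solve_method1 (row : Int) (col : Int) (matrix : List (List Int)) : Prop :=
  row ≤ (matrix.length : Int) ∧ ∀ r ∈ matrix.take row.toNat, col ≤ (r.length : Int)
instance (row : Int) (col : Int) (matrix : List (List Int)) : Decidable (Pre_solve_method1 row col matrix) := by
  unfold Pre_solve_method1; infer_instance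
def pvWitness_solve_method1 : Int × Int × List (List Int) := (2, 2, [[0, 1], [1, 0]])
def Spec_solve_method1 (row : Int) (col : Int) (matrix : List (List Int)) (out : Int × Int) : Prop := out = solve_method1_alt row col matrix
instance (row : Int) (col : Int) (matrix : List (List Int)) (out : Int × Int) : Decidable (Spec_solve_method1 row col matrix out) := by unfold Spec_solve_method1; infer_instance

-- ===== CLAIM (what is proved, stated in full; the proofs are below) =====
def Claim_equal_solve_method1 : Prop := ∀ (row : Int) (col : Int) (matrix : List (List Int)), Dom_solve_method1 row col matrix → Pre_solve_method1 row col matrix → Spec_solve_method1 row col matrix (solve_method1 row col matrix)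

-- ===== LEMMAS AND PROOFS =====

-- A counter loop with `fuel` steps starting at `i` is a fold over range(i, i+fuel).
theorem pv_pyLoop {σ : Type} (body : σ → Int → σ) (loop : Nat → Int → σ → σ)
    (h0 : ∀ i st, loop 0 i st = st)
    (hs : ∀ n i st, loop (n + 1) i st = loop n (i + 1) (body st i)) :
    ∀ (n : Nat) (i : Int) (st : σ), loop n i st = (PySem.List.pyRange i (i + n) 1).foldl body st := by
  intro n
  induction n with
  | zero =>
    intro i st
    rw [h0, PySem.List.pyRange_one_eq_nil (by simp)]
    rfl
  | succ k ih =>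
    intro i st
    rw [hs, ih]
    rw [show (i + 1) + ((k : Nat) : Int) = i + (((k + 1 : Nat)) : Int) by push_cast; ring]
    rw [PySem.List.pyRange_one_cons (show (i : Int) < i + (((k + 1 : Nat)) : Int) by push_cast; omega)]
    rfl

-- Specialised to `for i in range(t)`.
theorem pv_pyLoop_range {σ : Type} (body : σ → Int → σ) (loop : Nat → Int → σ → σ)
    (h0 : ∀ i st, loop 0 i st = st)
    (hs : ∀ n i st, loop (n + 1) i st = loop n (i + 1) (body st i))
    (t : Int) (st : σ) :
    loop t.toNat 0 st = (PySem.List.pyRange 0 t 1).foldl body st := by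
  by_cases ht : t ≤ 0
  · have h0' : t.toNat = 0 := by omega
    rw [h0', h0, PySem.List.pyRange_one_eq_nil ht]
    rfl
  · rw [pv_pyLoop body loop h0 hs t.toNat 0 st,
      show (0 : Int) + ((t.toNat : Nat) : Int) = t by omega]

-- `for i in range(n): … matrix[i] …` with n ≤ len(matrix) is a fold over the first n rows.
theorem pv_fold_take {α : Type} (matrix : List (List Int)) (f : α → List Int → α) (init : α)
    (n : Nat) (h : n ≤ matrix.length) :
    (PySem.List.pyRange 0 (n : Int) 1).foldl (fun acc i => f acc (PySem.List.pyGetD matrix i [])) init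
      = (matrix.take n).foldl f init := by
  induction n generalizing init with
  | zero => simp
  | succ k ih =>
    have hcast : (((k + 1 : Nat)) : Int) = (k : Int) + 1 := by push_cast; ring
    have hkl : k < matrix.length := by omega
    rw [hcast, PySem.List.pyRange_one_succ_right (by positivity), List.foldl_append,
      ih init (by omega), List.take_add_one, List.getElem?_eq_getElem hkl, List.foldl_append]
    simp [PySem.List.pyGetD_natCast, List.getD_eq_getElem?_getD, List.getElem?_eq_getElem hkl]

theorem pv_fold_rows {α : Type} (row : Int) (matrix : List (List Int)) (f : α → List Int → α)
    (init : α) (h : row ≤ (matrix.length : Int)) :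
    (PySem.List.pyRange 0 row 1).foldl (fun acc i => f acc (PySem.List.pyGetD matrix i [])) init
      = (matrix.take row.toNat).foldl f init := by
  by_cases hr : row ≤ 0
  · rw [PySem.List.pyRange_one_eq_nil hr]
    have h0 : row.toNat = 0 := by omega
    simp [h0]
  · have hcast : row = ((row.toNat : Nat) : Int) := by omega
    conv_lhs => rw [hcast]
    exact pv_fold_take matrix f init row.toNat (by omega)

-- B's paired fold splits into its two independent component folds.
theorem pv_foldl_pair (L : List (List Int)) (g : Int → List Int → Int)
    (z : List Int → List Int → List Int) (a : Int) (b : List Int) :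
    L.foldl (fun (st : Int × List Int) r => (g st.1 r, z st.2 r)) (a, b)
      = (L.foldl g a, L.foldl z b) := by
  induction L generalizing a b with
  | nil => rfl
  | cons r L ih => simp [List.foldl_cons, ih]

-- The per-column zero-count table after folding the rows, in closed form.
theorem pv_cz_fold (M : List (List Int)) (cn : Nat) (g : Nat → Int)
    (hcol : ∀ r ∈ M, cn ≤ r.length) :
    M.foldl (fun cz r => (cz.zip r).map (fun p => p.1 + if p.2 = 0 then 1 else 0))
        ((List.range cn).map g)
      = (List.range cn).map
          (fun j => g j + (M.countP (fun r => r.getD j 0 == 0) : Int)) := by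
  induction M generalizing g with
  | nil => simp
  | cons r M ih =>
    have hr : cn ≤ r.length := hcol r (by simp)
    have hstep : (((List.range cn).map g).zip r).map (fun p => p.1 + if p.2 = 0 then 1 else 0)
        = (List.range cn).map (fun j => g j + if r.getD j 0 = 0 then 1 else 0) := by
      apply List.ext_getElem
      · simp; omega
      · intro k h1 h2
        have hk : k < cn := by simpa using h2
        have hkr : k < r.length := lt_of_lt_of_le hk hr
        simp [List.getElem_zip, List.getD_eq_getElem?_getD, List.getElem?_eq_getElem hkr]
    rw [List.foldl_cons, hstep, ih _ (fun r hrm => hcol r (by simp [hrm]))]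
    apply List.map_congr_left
    intro j hj
    simp [List.countP_cons]
    ring

-- Counting a value in a mapped list is a countP on the original list.
theorem pv_count_map (M : List (List Int)) (f : List Int → Int) :
    PySem.List.count (M.map f) 0 = M.countP (fun r => f r == 0) := by
  simp [PySem.List.count_eq, List.count, List.countP_map]
  rfl

-- B's final scan is a counting fold.
theorem pv_scan_eq (row : Int) (l : List Int) (acc : Int) :
    pyBScan row l acc
      = l.foldl (fun (acc : Int) z => if z ≥ PySem.Int.floordiv row 2 then acc + 1 else acc) acc := by
  induction l generalizing acc with
  | nil => rfl
  | cons z zs ih => simp [pyBScan, ih]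

theorem solve_method1_spec_aux (row col : Int) (matrix : List (List Int))
    (hrow : row ≤ (matrix.length : Int))
    (hcolpre : ∀ r ∈ matrix.take row.toNat, col ≤ (r.length : Int)) :
    solve_method1 row col matrix = solve_method1_alt row col matrix := by
  have hcol' : ∀ r ∈ matrix.take row.toNat, col.toNat ≤ r.length := by
    intro r hr
    have := hcolpre r hr
    omega
  -- A's row loop as a fold over the rows
  have h1 : pyALoopRow matrix col row.toNat 0 0
      = (matrix.take row.toNat).foldl
      (fun (acc : Int) r => if (PySem.List.count r 0 : Int) ≥ PySem.Int.floordiv col 2 then acc + 1 else acc) 0 :=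
    (pv_pyLoop_range
      (fun (acc : Int) i => if (PySem.List.count (PySem.List.pyGetD matrix i []) 0 : Int) ≥ PySem.Int.floordiv col 2 then acc + 1 else acc)
      (pyALoopRow matrix col) (fun _ _ => rfl) (fun _ _ _ => rfl) row 0).trans
    (pv_fold_rows row matrix
      (fun (acc : Int) r => if (PySem.List.count r 0 : Int) ≥ PySem.Int.floordiv col 2 then acc + 1 else acc) 0 hrow)
  -- B's pair loop as a fold over the rows, separated into components
  have h2 : pyBLoopRow matrix col row.toNat 0 (0, List.replicate col.toNat 0)
      = ((matrix.take row.toNat).foldl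
          (fun (acc : Int) r => if (PySem.List.count r 0 : Int) ≥ PySem.Int.floordiv col 2 then acc + 1 else acc) 0,
         (matrix.take row.toNat).foldl
          (fun cz r => (cz.zip r).map (fun p => p.1 + if p.2 = 0 then 1 else 0)) (List.replicate col.toNat 0)) :=
    (pv_pyLoop_range
      (fun (st : Int × List Int) i =>
        ((if (PySem.List.count (PySem.List.pyGetD matrix i []) 0 : Int) ≥ PySem.Int.floordiv col 2 then st.1 + 1 else st.1),
         (st.2.zip (PySem.List.pyGetD matrix i [])).map (fun p => p.1 + if p.2 = 0 then 1 else 0)))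
      (pyBLoopRow matrix col) (fun _ _ => rfl) (fun _ _ _ => rfl) row (0, List.replicate col.toNat 0)).trans
    ((pv_fold_rows row matrix
      (fun (st : Int × List Int) r =>
        ((if (PySem.List.count r 0 : Int) ≥ PySem.Int.floordiv col 2 then st.1 + 1 else st.1),
         (st.2.zip r).map (fun p => p.1 + if p.2 = 0 then 1 else 0)))
      (0, List.replicate col.toNat 0) hrow).trans
    (pv_foldl_pair (matrix.take row.toNat)
      (fun (acc : Int) r => if (PySem.List.count r 0 : Int) ≥ PySem.Int.floordiv col 2 then acc + 1 else acc)
      (fun cz r => (cz.zip r).map (fun p => p.1 + if p.2 = 0 then 1 else 0)) 0 (List.replicate col.toNat 0)))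
  -- the final table
  have h3 : (matrix.take row.toNat).foldl
      (fun cz r => (cz.zip r).map (fun p => p.1 + if p.2 = 0 then 1 else 0)) (List.replicate col.toNat 0)
      = (List.range col.toNat).map
        (fun j => ((matrix.take row.toNat).countP (fun r => r.getD j 0 == 0) : Int)) := by
    have hrepl : (List.replicate col.toNat (0 : Int)) = (List.range col.toNat).map (fun _ => (0 : Int)) := by
      simp [List.map_const']
    rw [hrepl, pv_cz_fold (matrix.take row.toNat) col.toNat (fun _ => 0) hcol']
    simp
  -- A's per-column temporary list is a map over the rows
  have h4 : ∀ i : Int, pyALoopTmp matrix i row.toNat 0 []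
      = (matrix.take row.toNat).map (fun r => PySem.List.pyGetD r i 0) := by
    intro i
    exact (pv_pyLoop_range
        (fun t j => t ++ [PySem.List.pyGetD (PySem.List.pyGetD matrix j []) i 0])
        (pyALoopTmp matrix i) (fun _ _ => rfl) (fun _ _ _ => rfl) row []).trans
      ((pv_fold_rows row matrix (fun t r => t ++ [PySem.List.pyGetD r i 0]) [] hrow).trans
      ((PySem.List.foldl_append_singleton_eq_map (fun r => PySem.List.pyGetD r i 0)
        (matrix.take row.toNat) []).trans (List.nil_append _)))
  have h5 : PySem.List.pyRange 0 col 1 = (List.range (col - 0).toNat).map (fun (k : Nat) => ((0 : Int) + (k : Int))) :=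
    PySem.List.pyRange_one 0 col
  have hc0 : (col - 0).toNat = col.toNat := by omega
  -- A's column loop equals B's scan of the table
  have h6 : pyALoopCol matrix row col.toNat 0 0
      = ((matrix.take row.toNat).foldl
          (fun cz r => (cz.zip r).map (fun p => p.1 + if p.2 = 0 then 1 else 0))
          (List.replicate col.toNat 0)).foldl
        (fun (acc : Int) z => if z ≥ PySem.Int.floordiv row 2 then acc + 1 else acc) 0 := by
    rw [pv_pyLoop_range
      (fun (acc : Int) i => if (PySem.List.count (pyALoopTmp matrix i row.toNat 0 []) 0 : Int)
        ≥ PySem.Int.floordiv row 2 then acc + 1 else acc)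
      (pyALoopCol matrix row) (fun _ _ => rfl) (fun _ _ _ => rfl) col 0]
    rw [h3, h5, hc0, List.foldl_map, List.foldl_map]
    apply List.foldl_ext
    intro acc k hk
    rw [h4 ((0 : Int) + (k : Nat)),
      pv_count_map (matrix.take row.toNat) (fun r => PySem.List.pyGetD r ((0 : Int) + (k : Nat)) 0)]
    simp [PySem.List.pyGetD_natCast]
  simp only [solve_method1, solve_method1_alt]
  rw [h2]
  simp only [Prod.mk.injEq]
  exact ⟨h1, h6.trans (pv_scan_eq row _ 0).symm⟩

-- ===== VERDICT (by name: the statement is the Claim_ definition above) =====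
theorem solve_method1_spec : Claim_equal_solve_method1 := by
  intro row col matrix _ hpre
  unfold Spec_solve_method1
  exact solve_method1_spec_aux row col matrix hpre.1 hpre.2
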